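-- pv_equiv track=rewrite | github.com/daniel-reich/turbo-robot | vuSXW3iEnEQNZXjAP_18.py | create_square
-- ===== SOURCE A (Python) =====
-- def create_square(length):
--   def string(i,j):
--     return "#" if min(i,j) == 0 or max(i,j) == length - 1 else " "
--   if length is None:
--     return ""
--   elif length < 1:
--     return ""
--   else:
--     s = ""
--     for i in range(0,length):
--       for j in range(0,length):
--         s += string(i,j)
--       if i < length - 1:
--         s +="\n"
--     return s
-- ===== SOURCE B (Python) =====
-- def create_square(length):
--     if length is None or length < 1:
--         return ""
--     border = "#" * length
--     if length == 1:
--         rows = [border]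
--     else:
--         interior = "#" + " " * (length - 2) + "#"
--         rows = [border] + [interior] * (length - 2) + [border]
--     return "\n".join(rows)
-- ===== Notes on version B (the rewrite author's own statement) =====
-- stated objective: simpler
-- what changed: Replaces A's nested per-cell loop with its min/max membership test (and quadratic string appends) by building the border row and the interior row once as whole strings and joining [border] + (length-2)*[interior] + [border] with newlines.
import Mathlib
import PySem

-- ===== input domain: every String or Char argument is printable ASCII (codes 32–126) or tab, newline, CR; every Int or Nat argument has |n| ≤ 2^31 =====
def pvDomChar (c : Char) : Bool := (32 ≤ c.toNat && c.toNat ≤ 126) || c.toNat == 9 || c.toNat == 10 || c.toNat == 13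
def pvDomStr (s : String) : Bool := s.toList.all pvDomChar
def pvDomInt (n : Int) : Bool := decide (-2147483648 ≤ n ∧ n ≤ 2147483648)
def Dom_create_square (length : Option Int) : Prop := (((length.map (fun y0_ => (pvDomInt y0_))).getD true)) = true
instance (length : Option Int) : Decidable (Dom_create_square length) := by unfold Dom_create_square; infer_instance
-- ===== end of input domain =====

-- B replaces A's per-cell nested loop (min/max test per character) by row-level
-- construction: build the border row and the interior row once and join them; objective: simpler.


-- ===== PORT A =====
-- helper 'string(i, j)' of A
def pvCellA (length i j : Int) : String :=
  if min i j = 0 ∨ max i j = length - 1 then "#" else " "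

def create_square (length : Option Int) : String :=
  match length with
  | none => ""
  | some n =>
    if n < 1 then ""
    else
      (PySem.List.pyRange 0 n).foldl (fun s i =>
        let s := (PySem.List.pyRange 0 n).foldl (fun s j => s ++ pvCellA n i j) s
        if i < n - 1 then s ++ "\n" else s) ""

-- ===== PORT B =====
def create_square_alt (length : Option Int) : String :=
  match length with
  | none => ""
  | some n =>
    if n < 1 then ""
    else
      let border := String.ofList (List.replicate n.toNat '#')
      if n = 1 then
        PySem.Str.join "\n" [border]
      else
        let interior := "#" ++ String.ofList (List.replicate (n - 2).toNat ' ') ++ "#"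
        PySem.Str.join "\n" ([border] ++ List.replicate (n - 2).toNat interior ++ [border])

-- ===== PRECONDITION & SPEC =====
def Spec_create_square (length : Option Int) (out : String) : Prop := out = create_square_alt length
instance (length : Option Int) (out : String) : Decidable (Spec_create_square length out) := by unfold Spec_create_square; infer_instance

-- ===== CLAIM (what is proved, stated in full; the proofs are below) =====
def Claim_equal_create_square : Prop := ∀ (length : Option Int), Dom_create_square length → Spec_create_square length (create_square length)

-- ===== LEMMAS AND PROOFS =====

-- string-append fold shifts its seed out front
theorem foldl_str_shift (g : Int → String) (l : List Int) (s : String) :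
    l.foldl (fun acc x => acc ++ g x) s
      = s ++ l.foldl (fun acc x => acc ++ g x) "" := by
  induction l generalizing s with
  | nil => simp
  | cons a t ih =>
    simp only [List.foldl_cons]
    rw [ih (s ++ g a), ih ("" ++ g a)]
    apply String.toList_inj.mp
    simp

-- the inner loop from seed "" as a list of characters
def pvRowA (n i : Int) : List Char :=
  ((PySem.List.pyRange 0 n).foldl (fun s j => s ++ pvCellA n i j) "").toList

-- a fold of constant-'#' cells
theorem fold_cells_const (n i : Int)
    (hc : ∀ j, 0 ≤ j → j < n → pvCellA n i j = "#") :
    ∀ k : Nat, (k : Int) ≤ n →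
      (((PySem.List.pyRange 0 (k : Int)).foldl (fun s j => s ++ pvCellA n i j) "").toList)
        = List.replicate k '#' := by
  intro k
  induction k with
  | zero => intro _; simp [PySem.List.pyRange_one_eq_nil]
  | succ k ih =>
    intro hk
    have h : ((k : Int) + 1) = ((k + 1 : Nat) : Int) := by push_cast; ring
    rw [← h, PySem.List.pyRange_one_succ_right (by positivity)]
    have hck : pvCellA n i (k : Int) = "#" := hc _ (by positivity) (by omega)
    simp only [List.foldl_append, List.foldl_cons, List.foldl_nil, hck]
    rw [List.replicate_succ']
    simp [ih (by omega)]

-- border rows: every cell is '#'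
theorem rowA_border (n i : Int) (hn : 1 ≤ n) (hi : i = 0 ∨ i = n - 1) :
    pvRowA n i = List.replicate n.toNat '#' := by
  unfold pvRowA
  have hn' : ((n.toNat : Int)) = n := by omega
  rw [← hn']
  apply fold_cells_const
  · intro j h0 hjn
    unfold pvCellA
    rcases hi with hi | hi
    · exact if_pos (Or.inl (by omega))
    · exact if_pos (Or.inr (by omega))
  · omega

-- interior-row prefix: '#' then spaces
theorem fold_cells_interior (n i : Int) (h0 : 0 < i) (h1 : i < n - 1) :
    ∀ k : Nat, 1 ≤ k → (k : Int) ≤ n - 1 →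
      (((PySem.List.pyRange 0 (k : Int)).foldl (fun s j => s ++ pvCellA n i j) "").toList)
        = '#' :: List.replicate (k - 1) ' ' := by
  intro k
  induction k with
  | zero => omega
  | succ k ih =>
    intro _ hk
    rcases Nat.eq_zero_or_pos k with hk0 | hk1
    · subst hk0
      have hcell : pvCellA n i 0 = "#" := by
        unfold pvCellA
        exact if_pos (Or.inl (by omega))
      rw [show ((0:Nat) + 1 : Nat) = (1:Nat) from rfl]
      rw [show ((1:Nat) : Int) = (0:Int) + 1 from rfl, PySem.List.pyRange_one_singleton]
      simp [hcell]
    · have h : ((k : Int) + 1) = ((k + 1 : Nat) : Int) := by push_cast; ring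
      rw [← h, PySem.List.pyRange_one_succ_right (by positivity)]
      have hcell : pvCellA n i (k : Int) = " " := by
        unfold pvCellA
        exact if_neg (by omega)
      simp only [List.foldl_append, List.foldl_cons, List.foldl_nil, hcell]
      have : k + 1 - 1 = (k - 1) + 1 := by omega
      rw [this, List.replicate_succ']
      simp [ih hk1 (by omega)]

-- interior rows
theorem rowA_interior (n i : Int) (h0 : 0 < i) (h1 : i < n - 1) :
    pvRowA n i = '#' :: (List.replicate (n - 2).toNat ' ' ++ ['#']) := by
  unfold pvRowA
  have hn3 : 3 ≤ n := by omega
  have h1' : ((n - 1).toNat : Int) = n - 1 := by omega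
  have hsplit : PySem.List.pyRange 0 n = PySem.List.pyRange 0 (n - 1) ++ [n - 1] := by
    have h := PySem.List.pyRange_one_succ_right (a := 0) (b := n - 1) (by omega)
    rw [show n - 1 + 1 = n from by ring] at h
    exact h
  rw [hsplit]
  have hcell : pvCellA n i (n - 1) = "#" := by
    unfold pvCellA
    exact if_pos (Or.inr (by omega))
  simp only [List.foldl_append, List.foldl_cons, List.foldl_nil, hcell]
  have hpre := fold_cells_interior n i h0 h1 (n - 1).toNat (by omega) (by omega)
  rw [h1'] at hpre
  have h2 : (n - 1).toNat - 1 = (n - 2).toNat := by omega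
  rw [h2] at hpre
  simp [hpre]

-- join with a trailing singleton
theorem join_snoc (sep q : List Char) (parts : List (List Char)) :
    PySem.Chars.join sep (parts ++ [q])
      = (parts.map (· ++ sep)).flatten ++ q := by
  induction parts with
  | nil => simp [PySem.Chars.join_singleton]
  | cons p t ih =>
    cases t with
    | nil => simp [PySem.Chars.join_cons_cons, PySem.Chars.join_singleton]
    | cons p2 t2 =>
      simp only [List.cons_append] at ih ⊢
      rw [PySem.Chars.join_cons_cons, ih]
      simp

-- the all-newline prefix fold
theorem fold_newline (g : Int → String) (k : Nat) :
    (((PySem.List.pyRange 0 (k : Int)).foldl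
        (fun s i => s ++ g i ++ "\n") "").toList)
      = (((PySem.List.pyRange 0 (k : Int)).map (fun i => (g i).toList ++ ['\n'])).flatten) := by
  induction k with
  | zero => simp [PySem.List.pyRange_one_eq_nil]
  | succ k ih =>
    have h : ((k : Int) + 1) = ((k + 1 : Nat) : Int) := by push_cast; ring
    rw [← h, PySem.List.pyRange_one_succ_right (by positivity)]
    simp only [List.foldl_append, List.map_append, List.flatten_append, List.foldl_cons,
      List.foldl_nil, List.map_cons, List.map_nil, List.flatten_cons, List.flatten_nil]
    simp [ih]

-- the outer loop is a join of its rows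
theorem outer_join (g : Int → String) (n : Int) (hn : 1 ≤ n) :
    (((PySem.List.pyRange 0 n).foldl (fun s i =>
        let s' := s ++ g i
        if i < n - 1 then s' ++ "\n" else s') "").toList)
      = PySem.Chars.join ['\n'] ((PySem.List.pyRange 0 n).map (fun i => (g i).toList)) := by
  have hsplit : PySem.List.pyRange 0 n = PySem.List.pyRange 0 (n - 1) ++ [n - 1] := by
    have h := PySem.List.pyRange_one_succ_right (a := 0) (b := n - 1) (by omega)
    rw [show n - 1 + 1 = n from by ring] at h
    exact h
  rw [hsplit]
  simp only [List.foldl_append, List.foldl_cons, List.foldl_nil, List.map_append,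
    List.map_cons, List.map_nil]
  rw [if_neg (by omega)]
  rw [PySem.List.foldl_congr_mem _ _ (fun s i => s ++ g i ++ "\n") ""
      (by
        intro acc x hx
        rw [PySem.List.mem_pyRange_one] at hx
        simp only []
        rw [if_pos (by omega)])]
  have hc : ((n - 1).toNat : Int) = n - 1 := by omega
  have hfn := fold_newline g (n - 1).toNat
  rw [hc] at hfn
  rw [join_snoc]
  simp only [String.toList_append, hfn, List.map_map, Function.comp_def]

-- the list of A's rows, for n ≥ 2
theorem rows_eq (n : Int) (hn : 2 ≤ n) :
    (PySem.List.pyRange 0 n).map (fun i => pvRowA n i)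
      = List.replicate n.toNat '#' ::
        (List.replicate (n - 2).toNat ('#' :: (List.replicate (n - 2).toNat ' ' ++ ['#']))
          ++ [List.replicate n.toNat '#']) := by
  apply List.ext_getElem
  · simp [PySem.List.length_pyRange_one]
    omega
  · intro k h1 h2
    rw [List.getElem_map, PySem.List.getElem_pyRange_one]
    have hk : k < n.toNat := by
      simpa [PySem.List.length_pyRange_one] using h1
    rcases Nat.eq_zero_or_pos k with hk0 | hkpos
    · subst hk0
      simp only [List.getElem_cons_zero]
      exact rowA_border n 0 (by omega) (Or.inl (by norm_num))
    · rw [List.getElem_cons, dif_neg (by omega)]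
      by_cases hlast : k = n.toNat - 1
      · rw [List.getElem_append_right (by simp; omega)]
        simp only [List.length_replicate]
        rw [List.getElem_singleton]
        exact rowA_border n (0 + (k : Int)) (by omega) (Or.inr (by omega))
      · rw [List.getElem_append_left (by simp; omega)]
        rw [List.getElem_replicate]
        exact rowA_interior n (0 + (k : Int)) (by omega) (by omega)

-- ===== VERDICT (by name: the statement is the Claim_ definition above) =====
theorem create_square_spec : Claim_equal_create_square := by
  intro length _
  unfold Spec_create_square
  match length with
  | none => rfl
  | some n =>
    by_cases hn : n < 1
    · simp [create_square, create_square_alt, hn]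
    · rw [Int.not_lt] at hn
      apply String.toList_inj.mp
      simp only [create_square, create_square_alt]
      rw [if_neg (by omega), if_neg (by omega)]
      rw [PySem.List.foldl_congr_mem _ _
          (fun s i =>
            let s' := s ++ ((PySem.List.pyRange 0 n).foldl (fun s j => s ++ pvCellA n i j) "")
            if i < n - 1 then s' ++ "\n" else s') ""
          (by
            intro acc x _
            simp only []
            rw [foldl_str_shift (fun j => pvCellA n x j)])]
      rw [outer_join _ n hn]
      by_cases h1 : n = 1
      · subst h1
        rw [if_pos rfl]
        decide
      · rw [if_neg h1]
        rw [PySem.Str.toList_join]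
        have hrows := rows_eq n (by omega)
        have hmap : (PySem.List.pyRange 0 n).map
            (fun i => ((PySem.List.pyRange 0 n).foldl (fun s j => s ++ pvCellA n i j) "").toList)
            = (PySem.List.pyRange 0 n).map (fun i => pvRowA n i) := rfl
        rw [hmap, hrows]
        simp [List.map_replicate]
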